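-- pv_equiv track=rewrite | github.com/adamwebmaker/TSP | main.py | pheromones_graph
-- ===== SOURCE A (Python) =====
-- def pheromones_graph(matrix):
--     new = []
--     for i in range(len(matrix)):
--         temp = []
--         for j in range(len(matrix)):
--             if i == j:
--                 temp.append(0)
--             else:
--                 temp.append(1)
--         new.append(temp)
--     return new
-- ===== SOURCE B (Python) =====
-- def pheromones_graph(matrix):
--     n = len(matrix)
--     flat = ([0] + [1] * n) * n
--     return [flat[i * n : (i + 1) * n] for i in range(n)]
-- ===== Notes on version B (the rewrite author's own statement) =====
-- stated objective: alternative
-- what changed: Instead of nested per-cell loops with an i==j branch, B exploits the period-(n+1) structure of the matrix: it builds one flat list ([0]+[1]*n)*n, whose zeros land exactly on the diagonal positions, and slices it into n rows of length n.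
import Mathlib
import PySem

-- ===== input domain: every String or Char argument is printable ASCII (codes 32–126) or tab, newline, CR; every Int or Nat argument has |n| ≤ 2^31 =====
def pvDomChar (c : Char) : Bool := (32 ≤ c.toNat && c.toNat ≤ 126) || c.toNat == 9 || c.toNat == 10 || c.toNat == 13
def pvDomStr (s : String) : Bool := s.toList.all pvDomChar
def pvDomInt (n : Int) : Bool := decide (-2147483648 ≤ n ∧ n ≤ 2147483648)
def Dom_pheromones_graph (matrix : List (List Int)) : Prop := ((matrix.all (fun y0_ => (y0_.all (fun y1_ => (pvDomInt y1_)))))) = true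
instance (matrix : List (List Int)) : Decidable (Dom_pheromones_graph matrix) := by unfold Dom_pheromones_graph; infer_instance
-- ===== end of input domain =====

-- B builds one flat periodic list ([0]+[1]*n)*n whose zeros fall exactly on the diagonal
-- positions, then slices it into the n rows (objective: alternative algorithm, same cost).


-- ===== PORT A =====
-- literal transliteration: nested loops over range(len(matrix)), appending 0 on the diagonal and 1 elsewhere
def pheromones_graph (matrix : List (List Int)) : List (List Int) :=
  (PySem.List.pyRange 0 (matrix.length : Int) 1).foldl
    (fun new i =>
      new ++ [(PySem.List.pyRange 0 (matrix.length : Int) 1).foldl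
        (fun temp j => temp ++ [if i == j then (0 : Int) else 1]) []])
    []

-- ===== PORT B =====
-- literal transliteration of Source B: flat = ([0]+[1]*n)*n, rows are slices flat[i*n:(i+1)*n]
def pheromones_graph_alt (matrix : List (List Int)) : List (List Int) :=
  let n := matrix.length
  let flat := (List.replicate n ((0 : Int) :: List.replicate n 1)).flatten
  (List.range n).map (fun i =>
    PySem.List.slice flat (some ((i * n : Nat) : Int)) (some (((i + 1) * n : Nat) : Int)))

-- ===== PRECONDITION & SPEC =====
def Spec_pheromones_graph (matrix : List (List Int)) (out : List (List Int)) : Prop := out = pheromones_graph_alt matrix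
instance (matrix : List (List Int)) (out : List (List Int)) : Decidable (Spec_pheromones_graph matrix out) := by unfold Spec_pheromones_graph; infer_instance

-- ===== CLAIM =====
def Claim_equal_pheromones_graph : Prop := ∀ (matrix : List (List Int)), Dom_pheromones_graph matrix → Spec_pheromones_graph matrix (pheromones_graph matrix)

-- ===== LEMMAS AND PROOFS =====

-- append-accumulator fold is map
lemma foldl_append_singleton {α β : Type} (f : α → β) :
    ∀ (l : List α) (acc : List β), l.foldl (fun a x => a ++ [f x]) acc = acc ++ l.map f := by
  intro l
  induction l with
  | nil => simp
  | cons x xs ih => intro acc; simp [List.foldl, ih]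

-- A as a map over pyRange
lemma portA_eq (matrix : List (List Int)) :
    pheromones_graph matrix
      = (PySem.List.pyRange 0 (matrix.length : Int) 1).map
          (fun i => (PySem.List.pyRange 0 (matrix.length : Int) 1).map
            (fun j => if i == j then (0 : Int) else 1)) := by
  unfold pheromones_graph
  rw [foldl_append_singleton]
  simp only [List.nil_append]
  congr 1
  funext i
  rw [foldl_append_singleton]
  simp

lemma flatten_replicate_length {α : Type} (m : Nat) (r : List α) :
    (List.replicate m r).flatten.length = m * r.length := by
  induction m with
  | zero => simp
  | succ k ih => simp [List.replicate_succ, ih]; ring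

lemma getElem_flatten_replicate {α : Type} (r : List α) (hr : 0 < r.length) :
    ∀ (m k : Nat) (h : k < ((List.replicate m r).flatten).length),
      ((List.replicate m r).flatten)[k] = r[k % r.length]'(Nat.mod_lt _ hr) := by
  intro m
  induction m with
  | zero => intro k h; simp at h
  | succ p ih =>
    intro k h
    simp only [List.replicate_succ, List.flatten_cons]
    by_cases hk : k < r.length
    · rw [List.getElem_append_left hk]
      congr 1
      exact (Nat.mod_eq_of_lt hk).symm
    · push Not at hk
      have h' : k - r.length < ((List.replicate p r).flatten).length := by
        simp only [List.replicate_succ, List.flatten_cons, List.length_append] at h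
        omega
      rw [List.getElem_append_right hk]
      rw [ih (k - r.length) h']
      congr 1
      conv_rhs => rw [← Nat.sub_add_cancel hk]
      rw [Nat.add_mod_right]

-- diagonal arithmetic: (i*n + j) % (n+1) = 0 ↔ i = j, for i,j < n
lemma diag_mod (n i j : Nat) (hi : i < n) (hj : j < n) :
    (i * n + j) % (n + 1) = 0 ↔ i = j := by
  constructor
  · intro h
    have hd : (n + 1) ∣ (i * n + j) := Nat.dvd_of_mod_eq_zero h
    have hd2 : (n + 1) ∣ (i * n + i) := ⟨i, by ring⟩
    by_cases hij : i ≤ j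
    · have : (n + 1) ∣ (j - i) := by
        have := Nat.dvd_sub hd hd2
        simpa [Nat.add_sub_add_left, Nat.sub_add_comm] using this
      have := Nat.eq_zero_of_dvd_of_lt this (by omega)
      omega
    · push Not at hij
      have : (n + 1) ∣ (i - j) := by
        have := Nat.dvd_sub hd2 hd
        simpa [Nat.add_sub_add_left] using this
      have := Nat.eq_zero_of_dvd_of_lt this (by omega)
      omega
  · intro h
    subst h
    have : i * n + i = i * (n + 1) := by ring
    rw [this]
    exact Nat.mul_mod_left _ _

-- the pattern row [0,1,1,...,1] read at index t
lemma cons_get_01 (n t : Nat) (h : t < n + 1) :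
    ((0 : Int) :: List.replicate n 1)[t]'(by simp; omega) = if t = 0 then 0 else 1 := by
  cases t with
  | zero => simp
  | succ s => simp

-- one row of B equals the 0/1 diagonal row
lemma rowB_eq (n i : Nat) (hi : i < n) :
    PySem.List.slice ((List.replicate n ((0 : Int) :: List.replicate n 1)).flatten)
        (some ((i * n : Nat) : Int)) (some (((i + 1) * n : Nat) : Int))
      = (List.range n).map (fun j => if i = j then (0 : Int) else 1) := by
  rw [PySem.List.slice_natCast]
  have hlen : ((List.replicate n ((0 : Int) :: List.replicate n 1)).flatten).length = n * (n + 1) := by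
    rw [flatten_replicate_length]; simp
  have hsub : (i + 1) * n - i * n = n := by
    have : (i + 1) * n = i * n + n := by ring
    omega
  have hroom : i * n + n ≤ n * (n + 1) := by nlinarith
  apply List.ext_getElem
  · simp [hlen, hsub]
    omega
  · intro j h1 h2
    have hjn : j < n := by simpa using h2
    have hidx : i * n + j < ((List.replicate n ((0 : Int) :: List.replicate n 1)).flatten).length := by
      rw [hlen]; omega
    simp only [hsub]
    rw [List.getElem_take, List.getElem_drop]
    rw [List.getElem_map, List.getElem_range]
    rw [getElem_flatten_replicate _ (by simp)]
    simp only [List.length_cons, List.length_replicate]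
    have hmlt : (i * n + j) % (n + 1) < n + 1 := Nat.mod_lt _ (by omega)
    rw [cons_get_01 n _ hmlt]
    by_cases hij : i = j
    · subst hij
      simp [(diag_mod n i i hi hjn).mpr rfl]
    · have h0 : (i * n + j) % (n + 1) ≠ 0 := fun hc => hij ((diag_mod n i j hi hjn).mp hc)
      simp [h0, hij]

-- ===== VERDICT =====
theorem pheromones_graph_spec : Claim_equal_pheromones_graph := by
  intro matrix _
  unfold Spec_pheromones_graph pheromones_graph_alt
  rw [portA_eq]
  set n := matrix.length with hn
  apply List.ext_getElem
  · simp [PySem.List.length_pyRange_one]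
  · intro k h1 h2
    have hk : k < n := by simpa [PySem.List.length_pyRange_one] using h1
    rw [List.getElem_map, List.getElem_map, List.getElem_range, PySem.List.getElem_pyRange_one]
    rw [rowB_eq n k hk]
    apply List.ext_getElem
    · simp [PySem.List.length_pyRange_one]
    · intro j j1 j2
      have hj : j < n := by simpa [PySem.List.length_pyRange_one] using j1
      rw [List.getElem_map, List.getElem_map, List.getElem_range, PySem.List.getElem_pyRange_one]
      by_cases h : k = j
      · simp [h]
      · simp [h]
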